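-- pv_equiv track=rewrite | github.com/phuthai29062005/CVRP_neural | caculate.py | separate_routes
-- ===== SOURCE A (Python) =====
-- def separate_routes(parent, route):
--     """
--     Tách các route riêng lẻ từ parent và route marker
--
--     Args:
--         parent: Danh sách khách hàng [c1, c2, c3, ...]
--         route: Danh sách marker [1, 0, 0, 1, 0, 1, ...] (1 = bắt đầu route mới)
--
--     Returns:
--         Danh sách các route: [[c1, c2], [c3], [c4, c5, ...]]
--     """
--     routes = []
--     current_route = []
--
--     for i in range(len(parent)):
--         if route[i] == 1:  # Bắt đầu route mới
--             if current_route:  # Nếu có route trước đó, lưu lại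
--                 routes.append(current_route)
--             current_route = [parent[i]]
--         else:  # Tiếp tục route hiện tại
--             current_route.append(parent[i])
--
--     # Lưu route cuối cùng
--     if current_route:
--         routes.append(current_route)
--
--     return routes
-- ===== SOURCE B (Python) =====
-- def separate_routes(parent, route):
--     n = len(parent)
--     cuts = [i for i in range(n) if route[i] == 1]
--     if n == 0:
--         return []
--     points = cuts if (cuts and cuts[0] == 0) else [0] + cuts
--     res = [parent[p:q] for p, q in zip(points, points[1:])]
--     res.append(parent[points[-1]:])
--     return res
-- ===== Notes on version B (the rewrite author's own statement) =====
-- stated objective: alternative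
-- what changed: B first collects the boundary indices where route[i]==1 in one scan and then builds each group by slicing parent between consecutive boundaries, instead of A's element-by-element accumulation into a current-route buffer.
import Mathlib
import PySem

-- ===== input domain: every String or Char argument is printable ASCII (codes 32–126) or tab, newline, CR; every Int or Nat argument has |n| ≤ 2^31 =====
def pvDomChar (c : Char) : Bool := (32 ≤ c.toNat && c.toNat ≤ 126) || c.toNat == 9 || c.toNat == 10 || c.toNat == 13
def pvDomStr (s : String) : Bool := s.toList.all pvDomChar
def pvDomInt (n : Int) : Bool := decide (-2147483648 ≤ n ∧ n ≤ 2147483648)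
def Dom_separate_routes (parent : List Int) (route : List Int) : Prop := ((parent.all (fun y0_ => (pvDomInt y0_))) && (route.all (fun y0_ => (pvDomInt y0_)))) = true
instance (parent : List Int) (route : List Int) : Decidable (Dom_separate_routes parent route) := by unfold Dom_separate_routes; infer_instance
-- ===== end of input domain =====

-- B collects the boundary indices where route[i]==1 in one scan and slices parent between
-- consecutive boundaries, instead of A's element-by-element accumulation (objective: alternative).

-- ===== PORT A =====
-- Literal port of A: loop over range(len(parent)) with state (routes, current_route).
-- route[i] / parent[i] use pyGetD, exact under Pre_ (0 ≤ i < length of both lists).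
def separate_routes (parent : List Int) (route : List Int) : List (List Int) :=
  let st := (PySem.List.pyRange 0 (PySem.List.len parent) 1).foldl
    (fun (st : List (List Int) × List Int) i =>
      if PySem.List.pyGetD route i 0 == 1 then
        ((if st.2.isEmpty then st.1 else st.1 ++ [st.2]), [PySem.List.pyGetD parent i 0])
      else
        (st.1, st.2 ++ [PySem.List.pyGetD parent i 0]))
    ([], [])
  if st.2.isEmpty then st.1 else st.1 ++ [st.2]

-- ===== PORT B =====
-- Port of Source B: cuts = boundary indices, points = [0]+cuts (no duplicate 0), then slices.
-- points[-1] is ported as getLastD (points is nonempty by construction); parent[p:q] is slice.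
def separate_routes_alt (parent : List Int) (route : List Int) : List (List Int) :=
  let n := PySem.List.len parent
  let cuts := (PySem.List.pyRange 0 n 1).filter (fun i => PySem.List.pyGetD route i 0 == 1)
  if n == 0 then []
  else
    let points := if !cuts.isEmpty && (cuts.headD 0 == 0) then cuts else 0 :: cuts
    let res := (points.zip points.tail).map
      (fun pq => PySem.List.slice parent (some pq.1) (some pq.2))
    res ++ [PySem.List.slice parent (some (points.getLastD 0)) none]

-- ===== PRECONDITION & SPEC =====
-- A indexes route[i] for every i < len(parent): it raises IndexError iff route is shorter
-- than parent; Pre_ excludes exactly those inputs (B raises there too).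
def Pre_separate_routes (parent : List Int) (route : List Int) : Prop :=
  parent.length ≤ route.length
instance (parent : List Int) (route : List Int) : Decidable (Pre_separate_routes parent route) := by
  unfold Pre_separate_routes; infer_instance

def pvWitness_separate_routes : List Int × List Int := ([1, 2, 3], [1, 0, 1])

def Spec_separate_routes (parent : List Int) (route : List Int) (out : List (List Int)) : Prop := out = separate_routes_alt parent route
instance (parent : List Int) (route : List Int) (out : List (List Int)) : Decidable (Spec_separate_routes parent route out) := by unfold Spec_separate_routes; infer_instance

-- ===== CLAIM (what is proved, stated in full; the proofs are below) =====
def Claim_equal_separate_routes : Prop := ∀ (parent : List Int) (route : List Int), Dom_separate_routes parent route → Pre_separate_routes parent route → Spec_separate_routes parent route (separate_routes parent route)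

-- ===== LEMMAS AND PROOFS =====

-- A's loop body as a named step function.
def pvStep (parent route : List Int) (st : List (List Int) × List Int) (i : Int) :
    List (List Int) × List Int :=
  if PySem.List.pyGetD route i 0 == 1 then
    ((if st.2.isEmpty then st.1 else st.1 ++ [st.2]), [PySem.List.pyGetD parent i 0])
  else
    (st.1, st.2 ++ [PySem.List.pyGetD parent i 0])

-- A's state after the first m iterations.
def pvSt (parent route : List Int) (m : Nat) : List (List Int) × List Int :=
  (PySem.List.pyRange 0 (m : Int) 1).foldl (pvStep parent route) ([], [])

-- B's cuts / points restricted to the first m indices.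
def pvCuts (route : List Int) (m : Nat) : List Int :=
  (PySem.List.pyRange 0 (m : Int) 1).filter (fun i => PySem.List.pyGetD route i 0 == 1)

def pvPts (route : List Int) (m : Nat) : List Int :=
  if !(pvCuts route m).isEmpty && ((pvCuts route m).headD 0 == 0) then pvCuts route m
  else 0 :: pvCuts route m

def pvPairs (parent : List Int) (pts : List Int) : List (List Int) :=
  (pts.zip pts.tail).map (fun pq => PySem.List.slice parent (some pq.1) (some pq.2))

theorem pv_zip_tail_append (xs : List Int) (a : Int) (h : xs ≠ []) :
    (xs ++ [a]).zip (xs ++ [a]).tail = xs.zip xs.tail ++ [(xs.getLastD 0, a)] := by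
  induction xs with
  | nil => exact absurd rfl h
  | cons x xs ih =>
    cases xs with
    | nil => simp
    | cons y ys =>
      have := ih (by simp)
      simp only [List.cons_append, List.tail_cons, List.zip_cons_cons] at *
      simp [this]

theorem pv_take_drop_snoc (l : List Int) (t m : Nat) (ht : t ≤ m) (hm : m < l.length) :
    (l.drop t).take (m - t) ++ [l.getD m 0] = (l.drop t).take (m + 1 - t) := by
  have h1 : m + 1 - t = (m - t) + 1 := by omega
  rw [h1, List.take_add_one]
  have h2 : (l.drop t)[m - t]? = some l[m] := by
    rw [List.getElem?_drop]
    have : t + (m - t) = m := by omega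
    rw [this, List.getElem?_eq_getElem hm]
  rw [h2]
  simp [List.getD_eq_getElem?_getD, List.getElem?_eq_getElem hm]

theorem pv_cuts_succ (route : List Int) (m : Nat) :
    pvCuts route (m + 1) =
      pvCuts route m ++ (if PySem.List.pyGetD route (m : Int) 0 == 1 then [(m : Int)] else []) := by
  unfold pvCuts
  have : ((m + 1 : Nat) : Int) = (m : Int) + 1 := by push_cast; ring
  rw [this, PySem.List.pyRange_one_succ_right (by positivity), List.filter_append]
  split <;> simp_all

theorem pv_pts_ne_nil (route : List Int) (m : Nat) : pvPts route m ≠ [] := by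
  unfold pvPts
  split
  · rename_i h
    simp only [Bool.and_eq_true, Bool.not_eq_true'] at h
    simp [List.isEmpty_eq_false_iff] at h
    exact h.1
  · simp

theorem pv_pts_succ_true (route : List Int) (m : Nat) (hm : 1 ≤ m)
    (h : (PySem.List.pyGetD route (m : Int) 0 == 1) = true) :
    pvPts route (m + 1) = pvPts route m ++ [(m : Int)] := by
  have hne : ((m : Int) == 0) = false := by simp; omega
  unfold pvPts
  rw [pv_cuts_succ, h]
  simp only [if_true]
  cases hc : pvCuts route m with
  | nil => simp [hne]
  | cons c cs => by_cases hc0 : (c == 0) = true <;> simp [hc0]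

theorem pv_pts_succ_false (route : List Int) (m : Nat)
    (h : (PySem.List.pyGetD route (m : Int) 0 == 1) = false) :
    pvPts route (m + 1) = pvPts route m := by
  unfold pvPts
  rw [pv_cuts_succ, h]
  simp

theorem pv_slice_snoc (parent : List Int) (p : Int) (m : Nat) (hp : 0 ≤ p) (hpm : p ≤ (m : Int))
    (hm : m < parent.length) :
    PySem.List.slice parent (some p) (some (m : Int)) ++ [PySem.List.pyGetD parent (m : Int) 0]
      = PySem.List.slice parent (some p) (some ((m : Int) + 1)) := by
  rw [PySem.List.slice_toNat parent hp (by positivity),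
      PySem.List.slice_toNat parent hp (by omega)]
  have h1 : ((m : Int)).toNat = m := by omega
  have h2 : ((m : Int) + 1).toNat = m + 1 := by omega
  rw [h1, h2, PySem.List.pyGetD_natCast]
  exact pv_take_drop_snoc parent p.toNat m (by omega) hm

theorem pv_slice_singleton (parent : List Int) (m : Nat) (hm : m < parent.length) :
    PySem.List.slice parent (some (m : Int)) (some ((m : Int) + 1))
      = [PySem.List.pyGetD parent (m : Int) 0] := by
  have h := pv_slice_snoc parent (m : Int) m (by positivity) le_rfl hm
  rw [← h, PySem.List.slice_toNat parent (by positivity) (by positivity)]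
  simp

theorem pv_slice_ne_nil (parent : List Int) (p : Int) (m : Nat) (hp : 0 ≤ p)
    (hpm : p < (m : Int)) (hm : m ≤ parent.length) :
    (PySem.List.slice parent (some p) (some (m : Int))).isEmpty = false := by
  rw [PySem.List.slice_toNat parent hp (by positivity)]
  simp only [List.isEmpty_eq_false_iff, ← List.length_pos_iff, List.length_take,
    List.length_drop]
  omega

theorem pv_slice_to_end (parent : List Int) (p : Int) (hp : 0 ≤ p) :
    PySem.List.slice parent (some p) (some (parent.length : Int))
      = PySem.List.slice parent (some p) none := by
  rw [PySem.List.slice_toNat parent hp (by positivity), PySem.List.slice_from parent hp]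
  simp only [Int.toNat_natCast]
  exact List.take_of_length_le (by simp)

theorem pv_pairs_snoc (parent : List Int) (pts : List Int) (a : Int) (h : pts ≠ []) :
    pvPairs parent (pts ++ [a]) =
      pvPairs parent pts ++ [PySem.List.slice parent (some (pts.getLastD 0)) (some a)] := by
  unfold pvPairs
  rw [pv_zip_tail_append pts a h]
  simp

theorem pvSt_succ (parent route : List Int) (m : Nat) :
    pvSt parent route (m + 1) = pvStep parent route (pvSt parent route m) (m : Int) := by
  unfold pvSt
  have hc : ((m + 1 : Nat) : Int) = (m : Int) + 1 := by push_cast; ring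
  rw [hc, PySem.List.pyRange_one_succ_right (by positivity), List.foldl_append]
  simp

theorem pvInv (parent route : List Int) (m : Nat) (h1 : 1 ≤ m) (h2 : m ≤ parent.length) :
    pvSt parent route m =
      (pvPairs parent (pvPts route m),
       PySem.List.slice parent (some ((pvPts route m).getLastD 0)) (some (m : Int)))
    ∧ 0 ≤ (pvPts route m).getLastD 0 ∧ (pvPts route m).getLastD 0 < (m : Int) := by
  induction m with
  | zero => omega
  | succ m ih =>
    by_cases hm1 : m = 0
    · subst hm1
      have hrange : PySem.List.pyRange 0 ((1 : Nat) : Int) 1 = [0] := by decide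
      have hpts : pvPts route 1 = [0] := by
        unfold pvPts pvCuts
        rw [hrange]
        cases hp : (PySem.List.pyGetD route 0 0 == 1) <;> simp [hp]
      have hst : pvSt parent route 1 = ([], [PySem.List.pyGetD parent 0 0]) := by
        unfold pvSt pvStep
        rw [hrange]
        cases hp : (PySem.List.pyGetD route 0 0 == 1) <;> simp
      have hsl := pv_slice_singleton parent 0 (by omega)
      refine ⟨?_, ?_, ?_⟩
      · rw [hst, hpts]
        rw [show (([0] : List Int).getLastD 0) = ((0 : Nat) : Int) from rfl]
        rw [show ((1 : Nat) : Int) = ((0 : Nat) : Int) + 1 from rfl, hsl]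
        rfl
      · rw [hpts]; simp
      · rw [hpts]; simp
    · have hm : 1 ≤ m := by omega
      obtain ⟨hst, hp0, hpm⟩ := ih hm (by omega)
      have hcast : ((m + 1 : Nat) : Int) = (m : Int) + 1 := by push_cast; ring
      have hnil := pv_pts_ne_nil route m
      cases hpred : (PySem.List.pyGetD route (m : Int) 0 == 1) with
      | true =>
        have hpts := pv_pts_succ_true route m hm hpred
        have hne := pv_slice_ne_nil parent _ m hp0 hpm (by omega)
        refine ⟨?_, ?_, ?_⟩
        · rw [pvSt_succ, hst, hpts]
          unfold pvStep
          dsimp only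
          rw [pv_pairs_snoc parent _ _ hnil, List.getLastD_concat, hcast,
            pv_slice_singleton parent m (by omega)]
          rw [if_pos hpred, if_neg (by rw [hne]; decide)]
        · rw [hpts, List.getLastD_concat]; positivity
        · rw [hpts, List.getLastD_concat, hcast]; omega
      | false =>
        have hpts := pv_pts_succ_false route m hpred
        refine ⟨?_, ?_, ?_⟩
        · rw [pvSt_succ, hst, hpts]
          unfold pvStep
          dsimp only
          rw [hcast, ← pv_slice_snoc parent _ m hp0 (le_of_lt hpm) (by omega)]
          rw [if_neg (by rw [hpred]; decide)]
        · rw [hpts]; exact hp0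
        · rw [hpts, hcast]; omega

theorem pvA_eq (parent route : List Int) :
    separate_routes parent route =
      (if (pvSt parent route parent.length).2.isEmpty then (pvSt parent route parent.length).1
       else (pvSt parent route parent.length).1 ++ [(pvSt parent route parent.length).2]) := by
  unfold separate_routes pvSt pvStep
  rw [PySem.List.len_eq]

theorem pvB_eq (parent route : List Int) :
    separate_routes_alt parent route =
      (if ((parent.length : Int) == 0) then []
       else pvPairs parent (pvPts route parent.length) ++
         [PySem.List.slice parent (some ((pvPts route parent.length).getLastD 0)) none]) := by
  unfold separate_routes_alt pvPairs pvPts pvCuts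
  rw [PySem.List.len_eq]

-- ===== VERDICT (by name: the statement is the Claim_ definition above) =====
theorem separate_routes_spec : Claim_equal_separate_routes := by
  intro parent route _ _
  unfold Spec_separate_routes
  rw [pvA_eq, pvB_eq]
  by_cases h0 : parent.length = 0
  · rw [h0]
    have : pvSt parent route 0 = ([], []) := by
      unfold pvSt
      rw [PySem.List.pyRange_one_eq_nil (by omega)]
      rfl
    rw [this]
    simp
  · have h1 : 1 ≤ parent.length := by omega
    obtain ⟨hst, hp0, hpm⟩ := pvInv parent route parent.length h1 le_rfl
    rw [hst]
    dsimp only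
    have hz : (((parent.length : Int)) == 0) = false := by
      simp only [beq_eq_false_iff_ne, ne_eq, Nat.cast_eq_zero]
      exact h0
    have hne := pv_slice_ne_nil parent _ parent.length hp0 hpm le_rfl
    rw [pv_slice_to_end parent _ hp0] at hne ⊢
    rw [if_neg (by rw [hne]; decide), if_neg (by rw [hz]; decide)]
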